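-- pv_equiv track=rewrite | github.com/LomaxOnTheRun/advent-of-code | 2024/day_15/part_2.py | get_boxes_to_move
-- ===== SOURCE A (Python) =====
-- def get_next_boxes_to_move(current_boxes, dx, dy, boxes, box_pairs, walls):
--     next_boxes_to_move = set()
--     for x, y in current_boxes:
--         next_xy = (x + dx, y + dy)
--         if next_xy in walls:
--             return None
--         if next_xy in boxes:
--             next_boxes_to_move |= {next_xy, box_pairs[next_xy]}
--     next_boxes_to_move -= current_boxes
--     return next_boxes_to_move
--
-- def get_boxes_to_move(robot, dx, dy, boxes, box_pairs, walls):
--     next_xy = next_x, next_y = robot[0] + dx, robot[1] + dy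
--
--     if (next_x, next_y) in walls:
--         return None
--     if (next_x, next_y) not in boxes:
--         return set()
--
--     boxes_to_move = set()
--     next_boxes = {next_xy, box_pairs[next_xy]}
--     while next_boxes != set():
--         boxes_to_move |= next_boxes
--         next_boxes = get_next_boxes_to_move(next_boxes, dx, dy, boxes, box_pairs, walls)
--         if next_boxes is None:
--             # Wall hit, no boxes can move
--             return None
--
--     return boxes_to_move
-- ===== SOURCE B (Python) =====
-- def get_boxes_to_move(robot, dx, dy, boxes, box_pairs, walls):
--     ahead = (robot[0] + dx, robot[1] + dy)
--     if ahead in walls: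
--         return None
--     if ahead not in boxes:
--         return set()
--     visited = set()
--     queue = [ahead]
--     if box_pairs[ahead] != ahead:
--         queue.append(box_pairs[ahead])
--     while queue:
--         cell = queue.pop(0)
--         visited.add(cell)
--         nxt = (cell[0] + dx, cell[1] + dy)
--         if nxt in walls:
--             return None
--         if nxt in boxes:
--             for c in (nxt, box_pairs[nxt]):
--                 if c not in visited and c not in queue:
--                     queue.append(c)
--     return visited
-- ===== Notes on version B (the rewrite author's own statement) =====
-- stated objective: simpler
-- what changed: A iterates whole frontier layers (helper builds each next layer with set unions, subtracts the current layer, outer while merges layers); B replaces the nested layer loops by one flat worklist loop: pop one box cell, mark it visited, fail on a wall ahead, and push the box cell ahead and its pair when unseen.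
import Mathlib
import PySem

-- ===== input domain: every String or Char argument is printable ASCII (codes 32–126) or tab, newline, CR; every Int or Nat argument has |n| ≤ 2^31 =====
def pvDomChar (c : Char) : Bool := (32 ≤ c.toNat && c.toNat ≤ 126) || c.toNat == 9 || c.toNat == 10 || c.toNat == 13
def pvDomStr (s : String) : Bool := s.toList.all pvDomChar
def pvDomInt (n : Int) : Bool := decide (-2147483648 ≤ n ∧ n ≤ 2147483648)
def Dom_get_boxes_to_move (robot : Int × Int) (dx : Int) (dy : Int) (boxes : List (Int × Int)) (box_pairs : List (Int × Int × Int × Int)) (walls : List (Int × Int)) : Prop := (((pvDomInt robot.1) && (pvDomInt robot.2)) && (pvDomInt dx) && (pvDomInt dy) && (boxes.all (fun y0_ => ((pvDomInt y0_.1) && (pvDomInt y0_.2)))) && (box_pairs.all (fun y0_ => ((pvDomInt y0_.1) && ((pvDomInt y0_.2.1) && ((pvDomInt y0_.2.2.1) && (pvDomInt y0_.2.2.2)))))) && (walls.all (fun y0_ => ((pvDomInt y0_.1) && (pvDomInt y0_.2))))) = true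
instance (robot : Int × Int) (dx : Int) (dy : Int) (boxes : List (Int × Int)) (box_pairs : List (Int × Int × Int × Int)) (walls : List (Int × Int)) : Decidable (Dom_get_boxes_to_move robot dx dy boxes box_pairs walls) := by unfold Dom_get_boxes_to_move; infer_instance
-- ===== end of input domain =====

-- B replaces A's layered frontier loops (helper building each next layer with set unions
-- and a layer subtraction) by a single flat worklist loop over individual box cells: simpler.
-- The equivalence is about the RETURN value; neither version mutates its arguments.

-- ===== PORT A =====
-- box_pairs[c]: first-match lookup in the association list (dict keys are unique)
def pvLookup? (bp : List (Int × Int × Int × Int)) (c : Int × Int) : Option (Int × Int) :=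
  match bp with
  | [] => none
  | e :: rest => if (e.1, e.2.1) = c then some e.2.2 else pvLookup? rest c

-- total form of box_pairs[c]; exact whenever the key is present (Pre_ guarantees every
-- looked-up key is present; a missing key is Python's KeyError, excluded by Pre_)
def pvPair (bp : List (Int × Int × Int × Int)) (c : Int × Int) : Int × Int :=
  (pvLookup? bp c).getD (0, 0)

-- the 'for x, y in current_boxes' loop of get_next_boxes_to_move
def pvNextGo (dx dy : Int) (boxes walls : List (Int × Int)) (bp : List (Int × Int × Int × Int)) :
    List (Int × Int) → List (Int × Int) → Option (List (Int × Int))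
  | [], acc => some acc
  | c :: rest, acc =>
    let q := (c.1 + dx, c.2 + dy)
    if q ∈ walls then none
    else pvNextGo dx dy boxes walls bp rest
      (if q ∈ boxes then PySem.Set.add (PySem.Set.add acc q) (pvPair bp q) else acc)

-- get_next_boxes_to_move
def pvGetNext (dx dy : Int) (boxes walls : List (Int × Int)) (bp : List (Int × Int × Int × Int))
    (current : List (Int × Int)) : Option (List (Int × Int)) :=
  (pvNextGo dx dy boxes walls bp current PySem.Set.empty).map
    (fun acc => PySem.Set.diff acc current)

-- the 'while next_boxes != set()' loop; fuel only makes the recursion total (within Pre_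
-- the loop performs at most boxes.length + 1 iterations, so the fuel is never exhausted)
def pvALoop (dx dy : Int) (boxes : List (Int × Int)) (bp : List (Int × Int × Int × Int))
    (walls : List (Int × Int)) : Nat → List (Int × Int) → List (Int × Int) → Option (List (Int × Int))
  | 0, _, _ => none
  | fuel + 1, btm, nb =>
    if PySem.Set.equal nb PySem.Set.empty then some btm
    else
      let btm' := PySem.Set.union btm nb
      match pvGetNext dx dy boxes walls bp nb with
      | none => none
      | some nb' => pvALoop dx dy boxes bp walls fuel btm' nb'

def get_boxes_to_move (robot : Int × Int) (dx : Int) (dy : Int) (boxes : List (Int × Int)) (box_pairs : List (Int × Int × Int × Int)) (walls : List (Int × Int)) : Option (List (Int × Int)) :=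
  let next_xy : Int × Int := (robot.1 + dx, robot.2 + dy)
  if next_xy ∈ walls then none
  else if ¬ (next_xy ∈ boxes) then some PySem.Set.empty
  else
    pvALoop dx dy boxes box_pairs walls (boxes.length + 2) PySem.Set.empty
      (PySem.Set.add (PySem.Set.add PySem.Set.empty next_xy) (pvPair box_pairs next_xy))

-- ===== PORT B =====
-- the worklist loop of Source B; fuel only makes the recursion total (each pop visits a fresh
-- cell of a finite universe, so boxes.length + box_pairs.length + 2 is never exhausted
-- within Pre_)
def pvBLoop (dx dy : Int) (boxes : List (Int × Int)) (bp : List (Int × Int × Int × Int))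
    (walls : List (Int × Int)) : Nat → List (Int × Int) → List (Int × Int) → Option (List (Int × Int))
  | 0, _, _ => none
  | _ + 1, visited, [] => some visited
  | fuel + 1, visited, cell :: queue =>
    let visited' := PySem.Set.add visited cell
    let q : Int × Int := (cell.1 + dx, cell.2 + dy)
    if q ∈ walls then none
    else if q ∈ boxes then
      let p := pvPair bp q
      let queue1 := if ¬ q ∈ visited' ∧ ¬ q ∈ queue then queue ++ [q] else queue
      let queue2 := if ¬ p ∈ visited' ∧ ¬ p ∈ queue1 then queue1 ++ [p] else queue1
      pvBLoop dx dy boxes bp walls fuel visited' queue2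
    else pvBLoop dx dy boxes bp walls fuel visited' queue

def get_boxes_to_move_alt (robot : Int × Int) (dx : Int) (dy : Int) (boxes : List (Int × Int)) (box_pairs : List (Int × Int × Int × Int)) (walls : List (Int × Int)) : Option (List (Int × Int)) :=
  let ahead : Int × Int := (robot.1 + dx, robot.2 + dy)
  if ahead ∈ walls then none
  else if ¬ (ahead ∈ boxes) then some PySem.Set.empty
  else
    let p := pvPair box_pairs ahead
    let queue := if p ≠ ahead then [ahead, p] else [ahead]
    pvBLoop dx dy boxes box_pairs walls (boxes.length + box_pairs.length + 2) PySem.Set.empty queue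

-- ===== PRECONDITION & SPEC =====
-- Pre_-only lookup (first match, phrased via List.find?; proved equal to pvLookup? below)
def pvFind? (bp : List (Int × Int × Int × Int)) (c : Int × Int) : Option (Int × Int) :=
  (bp.find? (fun e => decide ((e.1, e.2.1) = c))).map (fun e => e.2.2)

-- When the pushed cell is actually a box, Pre_ additionally requires a unit move and an
-- involutive horizontally-adjacent box pairing covering every box cell (the day-15 wide-box
-- representation): outside it box_pairs lookups can raise KeyError and A's frontier loop,
-- which only subtracts the immediately preceding layer, can revisit cells and diverge
-- (on the excluded inputs where A does terminate, e.g. the cited dx = 2 push, B agrees with A).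
def Pre_get_boxes_to_move (robot : Int × Int) (dx : Int) (dy : Int) (boxes : List (Int × Int)) (box_pairs : List (Int × Int × Int × Int)) (walls : List (Int × Int)) : Prop :=
  (robot.1 + dx, robot.2 + dy) ∈ walls ∨ ¬ ((robot.1 + dx, robot.2 + dy) ∈ boxes) ∨
  (((dx = 1 ∧ dy = 0) ∨ (dx = -1 ∧ dy = 0) ∨ (dx = 0 ∧ dy = 1) ∨ (dx = 0 ∧ dy = -1)) ∧
   ∀ c ∈ boxes,
     (pvFind? box_pairs c).isSome = true ∧
     (pvFind? box_pairs c).getD (0, 0) ∈ boxes ∧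
     ((pvFind? box_pairs c).getD (0, 0) = (c.1 + 1, c.2) ∨
       (pvFind? box_pairs c).getD (0, 0) = (c.1 - 1, c.2)) ∧
     (pvFind? box_pairs ((pvFind? box_pairs c).getD (0, 0))).getD (0, 0) = c)
instance (robot : Int × Int) (dx : Int) (dy : Int) (boxes : List (Int × Int)) (box_pairs : List (Int × Int × Int × Int)) (walls : List (Int × Int)) : Decidable (Pre_get_boxes_to_move robot dx dy boxes box_pairs walls) := by unfold Pre_get_boxes_to_move; infer_instance

def pvWitness_get_boxes_to_move : (Int × Int) × Int × Int × (List (Int × Int)) × (List (Int × Int × Int × Int)) × (List (Int × Int)) :=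
  ((0, 0), 1, 0, [(1, 0), (2, 0)], [(1, 0, 2, 0), (2, 0, 1, 0)], [(4, 0)])

def Spec_get_boxes_to_move (robot : Int × Int) (dx : Int) (dy : Int) (boxes : List (Int × Int)) (box_pairs : List (Int × Int × Int × Int)) (walls : List (Int × Int)) (out : Option (List (Int × Int))) : Prop := out = get_boxes_to_move_alt robot dx dy boxes box_pairs walls
instance (robot : Int × Int) (dx : Int) (dy : Int) (boxes : List (Int × Int)) (box_pairs : List (Int × Int × Int × Int)) (walls : List (Int × Int)) (out : Option (List (Int × Int))) : Decidable (Spec_get_boxes_to_move robot dx dy boxes box_pairs walls out) := by unfold Spec_get_boxes_to_move; infer_instance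

-- ===== CLAIM (what is proved, stated in full; the proofs are below) =====
def Claim_equal_get_boxes_to_move : Prop := ∀ (robot : Int × Int) (dx : Int) (dy : Int) (boxes : List (Int × Int)) (box_pairs : List (Int × Int × Int × Int)) (walls : List (Int × Int)), Dom_get_boxes_to_move robot dx dy boxes box_pairs walls → Pre_get_boxes_to_move robot dx dy boxes box_pairs walls → Spec_get_boxes_to_move robot dx dy boxes box_pairs walls (get_boxes_to_move robot dx dy boxes box_pairs walls)

-- ===== LEMMAS AND PROOFS =====

-- progress measure along the push direction
def pvPhi (dx dy : Int) (c : Int × Int) : Int := dx * c.1 + dy * c.2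

-- the geometric part of Pre_, phrased with the ports' own pair function
def pvGood (dx dy : Int) (boxes : List (Int × Int)) (bp : List (Int × Int × Int × Int)) : Prop :=
  ((dx = 1 ∧ dy = 0) ∨ (dx = -1 ∧ dy = 0) ∨ (dx = 0 ∧ dy = 1) ∨ (dx = 0 ∧ dy = -1)) ∧
  ∀ c ∈ boxes, pvPair bp c ∈ boxes ∧
    (pvPair bp c = (c.1 + 1, c.2) ∨ pvPair bp c = (c.1 - 1, c.2)) ∧
    pvPair bp (pvPair bp c) = c

-- loop invariant of the layered BFS: nb is the current frontier, btm the visited cells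
def pvInv (dx dy : Int) (boxes : List (Int × Int))
    (btm nb : List (Int × Int)) : Prop :=
  nb.Nodup ∧ (∀ c ∈ nb, c ∈ boxes) ∧ (∀ c ∈ nb, ¬ c ∈ btm) ∧
  ((dx = 0 ∧ ∃ m, (∀ c ∈ btm, pvPhi dx dy c < m) ∧ (∀ c ∈ nb, pvPhi dx dy c = m)) ∨
   (dy = 0 ∧ ∃ a : Int × Int, (∀ c ∈ btm, pvPhi dx dy c < pvPhi dx dy a) ∧
      (∀ c ∈ nb, c = a ∨ c = (a.1 + dx, a.2))))

def pvMu (boxes btm : List (Int × Int)) : Nat :=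
  ((PySem.Set.ofList boxes).filter (fun c => !(decide (c ∈ btm)))).length

theorem pvFind?_eq_pvLookup? (bp : List (Int × Int × Int × Int)) (c : Int × Int) :
    pvFind? bp c = pvLookup? bp c := by
  induction bp with
  | nil => rfl
  | cons e rest ih =>
    simp only [pvFind?, pvLookup?, List.find?] at *
    by_cases h : (e.1, e.2.1) = c <;> simp [h, ih]

theorem pvPre_good (robot : Int × Int) (dx dy : Int) (boxes : List (Int × Int))
    (bp : List (Int × Int × Int × Int)) (walls : List (Int × Int))
    (h : Pre_get_boxes_to_move robot dx dy boxes bp walls)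
    (hw : ¬ (robot.1 + dx, robot.2 + dy) ∈ walls)
    (hb : (robot.1 + dx, robot.2 + dy) ∈ boxes) : pvGood dx dy boxes bp := by
  rcases h with h | h | h
  · exact absurd h hw
  · exact absurd hb h
  · refine ⟨h.1, fun c hc => ?_⟩
    have := h.2 c hc
    simp only [pvFind?_eq_pvLookup?] at this
    exact ⟨this.2.1, this.2.2.1, this.2.2.2⟩

theorem pvSet_equal_empty (s : List (Int × Int)) :
    PySem.Set.equal s PySem.Set.empty = true ↔ s = [] := by
  constructor
  · intro h
    cases s with
    | nil => rfl
    | cons c t =>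
      have := ((PySem.Set.equal_iff _ _).mp h c).mp (by simp)
      simp [PySem.Set.empty] at this
  · rintro rfl; rfl

theorem pvUnion_append (s t : List (Int × Int)) (ht : t.Nodup) (hd : ∀ x ∈ t, ¬ x ∈ s) :
    PySem.Set.union s t = s ++ t := by
  have H : ∀ (t s : List (Int × Int)), t.Nodup → (∀ x ∈ t, ¬ x ∈ s) →
      PySem.Set.union s t = s ++ t := by
    intro t
    induction t with
    | nil => intro s _ _; simp [PySem.Set.union]
    | cons c t ih =>
      intro s ht hd
      have h1 : PySem.Set.add s c = s ++ [c] := PySem.Set.add_of_not_mem (hd c (by simp))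
      have h2 : PySem.Set.union (s ++ [c]) t = (s ++ [c]) ++ t := by
        refine ih (s ++ [c]) (List.Nodup.of_cons ht) ?_
        intro x hx
        simp only [List.mem_append, List.mem_singleton]
        rintro (h | rfl)
        · exact hd x (by simp [hx]) h
        · exact (List.nodup_cons.mp ht).1 hx
      show PySem.Set.union (PySem.Set.add s c) t = s ++ c :: t
      rw [h1, h2]
      simp
  exact H t s ht hd

theorem pvDiff_filter (s t : List (Int × Int)) :
    PySem.Set.diff s t = s.filter (fun x => !(decide (x ∈ t))) := by
  have hc : ∀ x : Int × Int, PySem.Set.contains t x = decide (x ∈ t) := by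
    intro x
    cases hx : decide (x ∈ t) with
    | true =>
      simp only [decide_eq_true_eq] at hx
      exact (PySem.Set.contains_iff t x).mpr hx
    | false =>
      simp only [decide_eq_false_iff_not] at hx
      cases hcc : PySem.Set.contains t x with
      | true => exact absurd ((PySem.Set.contains_iff _ _).mp hcc) hx
      | false => rfl
  calc PySem.Set.diff s t = s.filter (fun x => !(PySem.Set.contains t x)) := rfl
    _ = s.filter (fun x => !(decide (x ∈ t))) := by
        apply List.filter_congr; intro x _; rw [hc]

theorem pvCountP_step (l btm : List (Int × Int)) (c : Int × Int) (hl : c ∈ l)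
    (hc : ¬ c ∈ btm) :
    l.countP (fun x => !(decide (x ∈ btm ++ [c]))) + 1 ≤
      l.countP (fun x => !(decide (x ∈ btm))) := by
  induction l with
  | nil => simp at hl
  | cons a l ih =>
    rw [List.countP_cons, List.countP_cons]
    rcases List.mem_cons.mp hl with h | h
    · subst h
      have h1 : (!(decide (c ∈ btm ++ [c]))) = false := by simp
      have h2 : (!(decide (c ∈ btm))) = true := by simp [hc]
      rw [h1, h2]
      have := List.countP_mono_left (l := l)
        (p := fun x => !(decide (x ∈ btm ++ [c]))) (q := fun x => !(decide (x ∈ btm)))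
        (by intro x _ hx
            simp only [Bool.not_eq_eq_eq_not, Bool.not_true, decide_eq_false_iff_not,
              List.mem_append] at hx ⊢
            exact fun h => hx (Or.inl h))
      simp only [Bool.false_eq_true, if_false, if_true]
      omega
    · have hrec := ih h
      have hmono : (if (!(decide (a ∈ btm ++ [c]))) = true then 1 else 0) ≤
          (if (!(decide (a ∈ btm))) = true then 1 else 0) := by
        by_cases ha : a ∈ btm
        · simp [List.mem_append, ha]
        · by_cases hac : a ∈ btm ++ [c] <;> simp [ha, hac]
      omega

theorem pvMu_drop (boxes btm nb : List (Int × Int)) (hN : nb.Nodup)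
    (hB : ∀ c ∈ nb, c ∈ boxes) (hD : ∀ c ∈ nb, ¬ c ∈ btm) :
    pvMu boxes (btm ++ nb) + nb.length ≤ pvMu boxes btm := by
  have H : ∀ (nb btm : List (Int × Int)), nb.Nodup → (∀ c ∈ nb, c ∈ boxes) →
      (∀ c ∈ nb, ¬ c ∈ btm) → pvMu boxes (btm ++ nb) + nb.length ≤ pvMu boxes btm := by
    intro nb
    induction nb with
    | nil => intro btm _ _ _; simp [pvMu]
    | cons c nb ih =>
      intro btm hN hB hD
      have hstep : pvMu boxes (btm ++ [c]) + 1 ≤ pvMu boxes btm := by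
        have hcS : c ∈ PySem.Set.ofList boxes :=
          (PySem.Set.mem_ofList _ _).mpr (hB c (by simp))
        unfold pvMu
        rw [← List.countP_eq_length_filter, ← List.countP_eq_length_filter]
        exact pvCountP_step _ _ _ hcS (hD c (by simp))
      have heq : btm ++ c :: nb = (btm ++ [c]) ++ nb := by simp
      rw [heq]
      have ihx := ih (btm ++ [c]) (List.Nodup.of_cons hN)
        (fun x hx => hB x (by simp [hx]))
        (by intro x hx
            simp only [List.mem_append, List.mem_singleton]
            rintro (h | rfl)
            · exact hD x (by simp [hx]) h
            · exact (List.nodup_cons.mp hN).1 hx)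
      simp only [List.length_cons]
      omega
  exact H nb btm hN hB hD

-- membership in the accumulator of the inner layer loop
theorem pvNextGo_mem (dx dy : Int) (boxes walls : List (Int × Int))
    (bp : List (Int × Int × Int × Int)) :
    ∀ (rest acc accF : List (Int × Int)),
      pvNextGo dx dy boxes walls bp rest acc = some accF →
      ∀ x ∈ accF, x ∈ acc ∨ ∃ c ∈ rest, (c.1 + dx, c.2 + dy) ∈ boxes ∧
        (x = (c.1 + dx, c.2 + dy) ∨ x = pvPair bp (c.1 + dx, c.2 + dy)) := by
  intro rest
  induction rest with
  | nil =>
    intro acc accF h x hx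
    simp only [pvNextGo] at h
    cases h
    exact Or.inl hx
  | cons c rest ih =>
    intro acc accF h x hx
    simp only [pvNextGo] at h
    by_cases hw : (c.1 + dx, c.2 + dy) ∈ walls
    · simp [hw] at h
    · rw [if_neg hw] at h
      by_cases hb : (c.1 + dx, c.2 + dy) ∈ boxes
      · rw [if_pos hb] at h
        rcases ih _ _ h x hx with hx2 | ⟨c2, hc2, hb2, hx2⟩
        · rcases (PySem.Set.mem_add _ _ _).mp hx2 with hx3 | rfl
          · rcases (PySem.Set.mem_add _ _ _).mp hx3 with hx4 | rfl
            · exact Or.inl hx4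
            · exact Or.inr ⟨c, by simp, hb, Or.inl rfl⟩
          · exact Or.inr ⟨c, by simp, hb, Or.inr rfl⟩
        · exact Or.inr ⟨c2, by simp [hc2], hb2, hx2⟩
      · rw [if_neg hb] at h
        rcases ih _ _ h x hx with hx2 | ⟨c2, hc2, hb2, hx2⟩
        · exact Or.inl hx2
        · exact Or.inr ⟨c2, by simp [hc2], hb2, hx2⟩

theorem pvNextGo_nodup (dx dy : Int) (boxes walls : List (Int × Int))
    (bp : List (Int × Int × Int × Int)) :
    ∀ (rest acc accF : List (Int × Int)), acc.Nodup →
      pvNextGo dx dy boxes walls bp rest acc = some accF → accF.Nodup := by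
  intro rest
  induction rest with
  | nil =>
    intro acc accF hN h
    simp only [pvNextGo] at h
    cases h
    exact hN
  | cons c rest ih =>
    intro acc accF hN h
    simp only [pvNextGo] at h
    by_cases hw : (c.1 + dx, c.2 + dy) ∈ walls
    · simp [hw] at h
    · rw [if_neg hw] at h
      by_cases hb : (c.1 + dx, c.2 + dy) ∈ boxes
      · rw [if_pos hb] at h
        exact ih _ _ (PySem.Set.nodup_add _ _ (PySem.Set.nodup_add _ _ hN)) h
      · rw [if_neg hb] at h
        exact ih _ _ hN h

theorem pvPhi_step (dx dy : Int) (hdir : dx * dx + dy * dy = 1) (c : Int × Int) :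
    pvPhi dx dy (c.1 + dx, c.2 + dy) = pvPhi dx dy c + 1 := by
  unfold pvPhi; linear_combination hdir

theorem pvPhi_shift (dx dy t : Int) (c : Int × Int) :
    pvPhi dx dy (c.1 + t, c.2) = pvPhi dx dy c + dx * t := by
  unfold pvPhi; ring

theorem pvNe {x y : Int × Int} {l : List (Int × Int)} (hx : ¬ x ∈ l) (hy : y ∈ l) :
    ¬ x = y := fun he => hx (he ▸ hy)

theorem pvMemEq {x y : Int × Int} {l : List (Int × Int)} (h : x = y) (hm : y ∈ l) : x ∈ l :=
  h ▸ hm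

-- frontier cells never step back into already-visited cells
theorem pvInv_geo (dx dy : Int) (boxes : List (Int × Int)) (bp : List (Int × Int × Int × Int))
    (btm nb : List (Int × Int)) (hG : pvGood dx dy boxes bp)
    (hI : pvInv dx dy boxes btm nb) :
    ∀ c ∈ nb, (c.1 + dx, c.2 + dy) ∈ boxes →
      (¬ (c.1 + dx, c.2 + dy) ∈ btm ∧ ¬ pvPair bp (c.1 + dx, c.2 + dy) ∈ btm) := by
  intro c hc hqb
  obtain ⟨hN, hB, hD, hcase⟩ := hI
  have hdir : dx * dx + dy * dy = 1 := by
    rcases hG.1 with ⟨h1, h2⟩ | ⟨h1, h2⟩ | ⟨h1, h2⟩ | ⟨h1, h2⟩ <;> rw [h1, h2] <;> norm_num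
  have hq1 : pvPhi dx dy (c.1 + dx, c.2 + dy) = pvPhi dx dy c + 1 := pvPhi_step dx dy hdir c
  obtain ⟨hpb, hpshape, _⟩ := hG.2 _ hqb
  have hpphi : pvPhi dx dy (pvPair bp (c.1 + dx, c.2 + dy)) =
      pvPhi dx dy (c.1 + dx, c.2 + dy) + dx ∨
      pvPhi dx dy (pvPair bp (c.1 + dx, c.2 + dy)) =
      pvPhi dx dy (c.1 + dx, c.2 + dy) - dx := by
    rcases hpshape with h | h <;> rw [h]
    · left
      have := pvPhi_shift dx dy 1 (c.1 + dx, c.2 + dy)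
      simpa using this
    · right
      have := pvPhi_shift dx dy (-1) (c.1 + dx, c.2 + dy)
      simp only [mul_neg_one] at this
      simpa [sub_eq_add_neg] using this
  rcases hcase with ⟨hdx0, m, hbtm, hnb⟩ | ⟨hdy0, a, hbtm, hnb⟩
  · have hφc : pvPhi dx dy c = m := hnb c hc
    constructor
    · intro hqbtm
      have := hbtm _ hqbtm
      omega
    · intro hp
      have h2 := hbtm _ hp
      rcases hpphi with h3 | h3 <;> omega
  · have hdd : dx * dx = 1 := by rw [hdy0] at hdir; simpa using hdir
    have hdx1 : dx = 1 ∨ dx = -1 := by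
      rcases hG.1 with ⟨h1, h2⟩ | ⟨h1, h2⟩ | ⟨h1, h2⟩ | ⟨h1, h2⟩
      · exact Or.inl h1
      · exact Or.inr h1
      · rw [h1] at hdd; simp at hdd
      · rw [h1] at hdd; simp at hdd
    have hφca : pvPhi dx dy c = pvPhi dx dy a ∨ pvPhi dx dy c = pvPhi dx dy a + 1 := by
      rcases hnb c hc with rfl | h
      · exact Or.inl rfl
      · right
        rw [h]
        have := pvPhi_shift dx dy dx a
        rw [this, hdd]
    constructor
    · intro hqbtm
      have := hbtm _ hqbtm
      rcases hφca with h3 | h3 <;> omega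
    · intro hp
      have h2 := hbtm _ hp
      rcases hpphi with h3 | h3 <;> rcases hφca with h4 | h4 <;> rcases hdx1 with h5 | h5 <;> omega

theorem pvPair_phi (dx dy : Int) (boxes : List (Int × Int)) (bp : List (Int × Int × Int × Int))
    (hG : pvGood dx dy boxes bp) (q : Int × Int) (hq : q ∈ boxes) :
    pvPhi dx dy (pvPair bp q) = pvPhi dx dy q + dx ∨
      pvPhi dx dy (pvPair bp q) = pvPhi dx dy q - dx := by
  rcases (hG.2 q hq).2.1 with h | h <;> rw [h]
  · left
    simpa using pvPhi_shift dx dy 1 q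
  · right
    have := pvPhi_shift dx dy (-1) q
    simp only [mul_neg_one] at this
    simpa [sub_eq_add_neg] using this

theorem pvGood_dx (dx dy : Int) (boxes : List (Int × Int)) (bp : List (Int × Int × Int × Int))
    (hG : pvGood dx dy boxes bp) (hdy0 : dy = 0) : dx = 1 ∨ dx = -1 := by
  rcases hG.1 with ⟨h1, h2⟩ | ⟨h1, h2⟩ | ⟨h1, h2⟩ | ⟨h1, h2⟩
  · exact Or.inl h1
  · exact Or.inr h1
  · rw [hdy0] at h2; norm_num at h2
  · rw [hdy0] at h2; norm_num at h2

-- the invariant survives one layer step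
theorem pvInv_step (dx dy : Int) (boxes walls : List (Int × Int))
    (bp : List (Int × Int × Int × Int)) (btm nb accF : List (Int × Int))
    (hG : pvGood dx dy boxes bp) (hI : pvInv dx dy boxes btm nb)
    (h : pvNextGo dx dy boxes walls bp nb [] = some accF) :
    pvInv dx dy boxes (btm ++ nb) (accF.filter (fun x => !(decide (x ∈ nb)))) := by
  have hICopy := hI
  obtain ⟨hN, hB, hD, hcase⟩ := hICopy
  have hmem' : ∀ x ∈ accF, ∃ c ∈ nb, (c.1 + dx, c.2 + dy) ∈ boxes ∧
      (x = (c.1 + dx, c.2 + dy) ∨ x = pvPair bp (c.1 + dx, c.2 + dy)) := by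
    intro x hx
    rcases pvNextGo_mem dx dy boxes walls bp nb [] accF h x hx with h0 | h0
    · simp at h0
    · exact h0
  have hgeo := pvInv_geo dx dy boxes bp btm nb hG hI
  have hdir : dx * dx + dy * dy = 1 := by
    rcases hG.1 with ⟨h1, h2⟩ | ⟨h1, h2⟩ | ⟨h1, h2⟩ | ⟨h1, h2⟩ <;> rw [h1, h2] <;> norm_num
  refine ⟨List.Nodup.filter _ (pvNextGo_nodup dx dy boxes walls bp nb [] accF (by simp) h),
    ?_, ?_, ?_⟩
  · intro x hx
    obtain ⟨c, hc, hqb, hxe⟩ := hmem' x (List.mem_filter.mp hx).1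
    rcases hxe with rfl | rfl
    · exact hqb
    · exact (hG.2 _ hqb).1
  · intro x hx
    have hx' := List.mem_filter.mp hx
    have hxnb : ¬ x ∈ nb := by simpa using hx'.2
    obtain ⟨c, hc, hqb, hxe⟩ := hmem' x hx'.1
    intro hmem2
    rcases List.mem_append.mp hmem2 with hb2 | hb2
    · rcases hxe with rfl | rfl
      · exact (hgeo c hc hqb).1 hb2
      · exact (hgeo c hc hqb).2 hb2
    · exact hxnb hb2
  · rcases hcase with ⟨hdx0, m, hbtm, hnb⟩ | ⟨hdy0, a, hbtm, hnb⟩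
    · left
      refine ⟨hdx0, m + 1, ?_, ?_⟩
      · intro x hx
        rcases List.mem_append.mp hx with h0 | h0
        · have := hbtm x h0; omega
        · have := hnb x h0; omega
      · intro x hx
        obtain ⟨c, hc, hqb, hxe⟩ := hmem' x (List.mem_filter.mp hx).1
        have hφc : pvPhi dx dy c = m := hnb c hc
        have hq1 : pvPhi dx dy (c.1 + dx, c.2 + dy) = pvPhi dx dy c + 1 :=
          pvPhi_step dx dy hdir c
        rcases hxe with rfl | rfl
        · omega
        · rcases pvPair_phi dx dy boxes bp hG _ hqb with h3 | h3 <;> omega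
    · right
      subst hdy0
      have hdd : dx * dx = 1 := by simpa using hdir
      have hdx1 := pvGood_dx dx 0 boxes bp hG rfl
      obtain ⟨a1, a2⟩ := a
      have hsh : ∀ c ∈ nb, c = ((a1, a2) : Int × Int) ∨ c = ((a1 + dx, a2) : Int × Int) := hnb
      have hφa1 : pvPhi dx 0 ((a1 + dx, a2) : Int × Int) = pvPhi dx 0 ((a1, a2) : Int × Int) + 1 := by
        have := pvPhi_shift dx 0 dx ((a1, a2) : Int × Int)
        simp only at this
        rw [this, hdd]
      have hφa2 : pvPhi dx 0 ((a1 + dx + dx, a2) : Int × Int) = pvPhi dx 0 ((a1, a2) : Int × Int) + 2 := by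
        have := pvPhi_shift dx 0 dx ((a1 + dx, a2) : Int × Int)
        simp only at this
        rw [this, hφa1, hdd]; ring
      by_cases hv : ((a1 + dx, a2) : Int × Int) ∈ nb
      · refine ⟨rfl, (a1 + dx + dx, a2), ?_, ?_⟩
        · intro x hx
          rcases List.mem_append.mp hx with h0 | h0
          · have := hbtm x h0; omega
          · rcases hsh x h0 with rfl | rfl <;> omega
        · intro x hx
          have hx' := List.mem_filter.mp hx
          have hxnb : ¬ x ∈ nb := by simpa using hx'.2
          obtain ⟨c, hc, hqb, hxe⟩ := hmem' x hx'.1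
          obtain ⟨c1, c2⟩ := c
          simp only at hqb hxe
          rcases hsh _ hc with hca | hca <;> simp only [Prod.mk.injEq] at hca <;>
            obtain ⟨hca1, hca2⟩ := hca <;>
            (rcases hxe with hxq | hxq
             · subst hxq
               rcases hdx1 with hdx | hdx <;> subst hdx <;>
                 first
                  | (exfalso; apply pvNe hxnb hc; simp only [Prod.mk.injEq, add_zero, and_true, true_and]; omega)
                  | (exfalso; apply pvNe hxnb hv; simp only [Prod.mk.injEq, add_zero, and_true, true_and]; omega)
                  | (left; simp only [Prod.mk.injEq, add_zero, and_true, true_and]; omega)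
                  | (right; simp only [Prod.mk.injEq, add_zero, and_true, true_and]; omega)

             · rcases (hG.2 _ hqb).2.1 with hp | hp <;> rw [hp] at hxq <;> subst hxq <;>
                 rcases hdx1 with hdx | hdx <;> subst hdx <;>
                 first
                  | (exfalso; apply pvNe hxnb hc; simp only [Prod.mk.injEq, add_zero, and_true, true_and]; omega)
                  | (exfalso; apply pvNe hxnb hv; simp only [Prod.mk.injEq, add_zero, and_true, true_and]; omega)
                  | (left; simp only [Prod.mk.injEq, add_zero, and_true, true_and]; omega)
                  | (right; simp only [Prod.mk.injEq, add_zero, and_true, true_and]; omega)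
                  | (exfalso; apply hv
                     exact pvMemEq (by simp only [Prod.mk.injEq, and_true, true_and]; omega) hc)
)
      · refine ⟨rfl, (a1 + dx, a2), ?_, ?_⟩
        · intro x hx
          rcases List.mem_append.mp hx with h0 | h0
          · have := hbtm x h0; omega
          · rcases hsh x h0 with rfl | rfl
            · omega
            · exact absurd h0 hv
        · intro x hx
          have hx' := List.mem_filter.mp hx
          have hxnb : ¬ x ∈ nb := by simpa using hx'.2
          obtain ⟨c, hc, hqb, hxe⟩ := hmem' x hx'.1
          obtain ⟨c1, c2⟩ := c
          simp only at hqb hxe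
          rcases hsh _ hc with hca | hca <;> simp only [Prod.mk.injEq] at hca <;>
            obtain ⟨hca1, hca2⟩ := hca <;>
            (rcases hxe with hxq | hxq
             · subst hxq
               rcases hdx1 with hdx | hdx <;> subst hdx <;>
                 first
                  | (exfalso; apply pvNe hxnb hc; simp only [Prod.mk.injEq, add_zero, and_true, true_and]; omega)
                  | (exfalso; apply pvNe hxnb hv; simp only [Prod.mk.injEq, add_zero, and_true, true_and]; omega)
                  | (left; simp only [Prod.mk.injEq, add_zero, and_true, true_and]; omega)
                  | (right; simp only [Prod.mk.injEq, add_zero, and_true, true_and]; omega)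

             · rcases (hG.2 _ hqb).2.1 with hp | hp <;> rw [hp] at hxq <;> subst hxq <;>
                 rcases hdx1 with hdx | hdx <;> subst hdx <;>
                 first
                  | (exfalso; apply pvNe hxnb hc; simp only [Prod.mk.injEq, add_zero, and_true, true_and]; omega)
                  | (exfalso; apply pvNe hxnb hv; simp only [Prod.mk.injEq, add_zero, and_true, true_and]; omega)
                  | (left; simp only [Prod.mk.injEq, add_zero, and_true, true_and]; omega)
                  | (right; simp only [Prod.mk.injEq, add_zero, and_true, true_and]; omega)
                  | (exfalso; apply hv
                     exact pvMemEq (by simp only [Prod.mk.injEq, and_true, true_and]; omega) hc)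
)

-- the worklist loop processes one frontier exactly as A's helper does
theorem pvInnerSim (dx dy : Int) (boxes walls : List (Int × Int))
    (bp : List (Int × Int × Int × Int)) (btm nb : List (Int × Int))
    (hnbN : nb.Nodup) (hnbB : ∀ c ∈ nb, ¬ c ∈ btm)
    (hgeo : ∀ c ∈ nb, (c.1 + dx, c.2 + dy) ∈ boxes →
      (¬ (c.1 + dx, c.2 + dy) ∈ btm ∧ ¬ pvPair bp (c.1 + dx, c.2 + dy) ∈ btm)) :
    ∀ (rest processed acc : List (Int × Int)) (fB : Nat),
      nb = processed ++ rest → acc.Nodup → (∀ x ∈ acc, ¬ x ∈ btm) →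
      pvBLoop dx dy boxes bp walls (fB + rest.length) (btm ++ processed)
          (rest ++ acc.filter (fun x => !(decide (x ∈ nb)))) =
        (match pvNextGo dx dy boxes walls bp rest acc with
         | none => none
         | some accF => pvBLoop dx dy boxes bp walls fB (btm ++ nb)
             (accF.filter (fun x => !(decide (x ∈ nb))))) := by
  intro rest
  induction rest with
  | nil =>
    intro processed acc fB hsplit haccN haccB
    rw [List.append_nil] at hsplit
    subst hsplit
    simp [pvNextGo]
  | cons cell rest' ih =>
    intro processed acc fB hsplit haccN haccB
    have hnbsplit : nb = (processed ++ [cell]) ++ rest' := by rw [hsplit]; simp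
    have hcellnb : cell ∈ nb := by rw [hsplit]; simp
    have hcellbtm : cell ∉ btm := hnbB cell hcellnb
    have hnodup2 := hnbN
    rw [hsplit] at hnodup2
    rcases List.nodup_append.mp hnodup2 with ⟨hndproc, hndrest, hdisj⟩
    have hcellproc : cell ∉ processed := fun hp => hdisj cell hp cell (by simp) rfl
    have hcellrest : cell ∉ rest' := (List.nodup_cons.mp hndrest).1
    have hsubproc : ∀ x, x ∈ processed → x ∈ nb := fun x hx => by rw [hsplit]; simp [hx]
    have hsubrest : ∀ x, x ∈ rest' → x ∈ nb := fun x hx => by rw [hsplit]; simp [hx]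
    have hlen : fB + (cell :: rest').length = (fB + rest'.length) + 1 := by
      simp only [List.length_cons]; omega
    rw [hlen, List.cons_append]
    have hvis : PySem.Set.add (btm ++ processed) cell = (btm ++ processed) ++ [cell] := by
      refine PySem.Set.add_of_not_mem ?_
      intro h
      rcases List.mem_append.mp h with h0 | h0
      · exact hcellbtm h0
      · exact hcellproc h0
    by_cases hw : ((cell.1 + dx, cell.2 + dy) : Int × Int) ∈ walls
    · simp [pvBLoop, pvNextGo, hw]
    · by_cases hb : ((cell.1 + dx, cell.2 + dy) : Int × Int) ∈ boxes
      · -- the cell ahead is a box: maybe push it and its pair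
        obtain ⟨hqbtm, hpbtm⟩ := hgeo cell hcellnb hb
        have hguard : ∀ (z : Int × Int) (acc' : List (Int × Int)), z ∉ btm →
            (if ¬ z ∈ (btm ++ processed) ++ [cell] ∧
                ¬ z ∈ rest' ++ acc'.filter (fun x => !(decide (x ∈ nb)))
              then (rest' ++ acc'.filter (fun x => !(decide (x ∈ nb)))) ++ [z]
              else rest' ++ acc'.filter (fun x => !(decide (x ∈ nb)))) =
            rest' ++ (PySem.Set.add acc' z).filter (fun x => !(decide (x ∈ nb))) := by
          intro z acc' hzbtm
          by_cases hznb : z ∈ nb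
          · rw [if_neg, PySem.Set.add_eq_ite]
            · split_ifs with hzacc
              · rfl
              · rw [List.filter_append]
                simp [hznb]
            · rw [hsplit] at hznb
              rcases List.mem_append.mp hznb with h0 | h0
              · intro hcond
                exact hcond.1 (by simp [h0])
              · rcases List.mem_cons.mp h0 with h1 | h1
                · intro hcond
                  exact hcond.1 (by simp [h1])
                · intro hcond
                  exact hcond.2 (by simp [h1])
          · by_cases hzacc : z ∈ acc'
            · rw [if_neg, PySem.Set.add_of_mem hzacc]
              intro hcond
              exact hcond.2 (by
                simp only [List.mem_append]
                exact Or.inr (List.mem_filter.mpr ⟨hzacc, by simp [hznb]⟩))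
            · rw [if_pos, PySem.Set.add_of_not_mem hzacc, List.filter_append]
              · simp [hznb]
              · constructor
                · intro h0
                  rcases List.mem_append.mp h0 with h1 | h1
                  · rcases List.mem_append.mp h1 with h2 | h2
                    · exact hzbtm h2
                    · exact hznb (hsubproc _ h2)
                  · exact hznb (by rw [hsplit]; simp [List.mem_singleton.mp h1])
                · intro h0
                  rcases List.mem_append.mp h0 with h1 | h1
                  · exact hznb (hsubrest _ h1)
                  · exact hzacc (List.mem_filter.mp h1).1
        simp only [pvBLoop, hvis, if_neg hw, if_pos hb,
          hguard _ _ hqbtm, hguard _ _ hpbtm]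
        have hrw : (btm ++ processed) ++ [cell] = btm ++ (processed ++ [cell]) :=
          List.append_assoc btm processed [cell]
        rw [hrw, ih (processed ++ [cell])
          (PySem.Set.add (PySem.Set.add acc (cell.1 + dx, cell.2 + dy))
            (pvPair bp (cell.1 + dx, cell.2 + dy))) fB hnbsplit
          (PySem.Set.nodup_add _ _ (PySem.Set.nodup_add _ _ haccN))
          ?_]
        · simp only [pvNextGo, if_neg hw, if_pos hb]
        · intro x hx
          rcases (PySem.Set.mem_add _ _ _).mp hx with hx1 | rfl
          · rcases (PySem.Set.mem_add _ _ _).mp hx1 with hx2 | rfl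
            · exact haccB x hx2
            · exact hqbtm
          · exact hpbtm
      · -- no box ahead: just move to the next frontier cell
        simp only [pvBLoop, hvis, if_neg hw, if_neg hb]
        have hrw : (btm ++ processed) ++ [cell] = btm ++ (processed ++ [cell]) :=
          List.append_assoc btm processed [cell]
        rw [hrw, ih (processed ++ [cell]) acc fB hnbsplit haccN haccB]
        simp only [pvNextGo, if_neg hw, if_neg hb]

theorem pvOuterSim (dx dy : Int) (boxes walls : List (Int × Int))
    (bp : List (Int × Int × Int × Int)) (hG : pvGood dx dy boxes bp) :
    ∀ (fA fB : Nat) (btm nb : List (Int × Int)), pvInv dx dy boxes btm nb →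
      pvMu boxes btm < fA → pvMu boxes btm < fB →
      pvALoop dx dy boxes bp walls fA btm nb = pvBLoop dx dy boxes bp walls fB btm nb := by
  intro fA
  induction fA with
  | zero =>
    intro fB btm nb hI hA hB2
    omega
  | succ f ihf =>
    intro fB btm nb hI hA hB2
    have hIc := hI
    obtain ⟨hnbN, hnbBox, hnbD, _⟩ := hIc
    cases nb with
    | nil =>
      obtain ⟨g, rfl⟩ : ∃ g, fB = g + 1 := ⟨fB - 1, by omega⟩
      simp [pvALoop, pvBLoop]
    | cons c rest =>
      have hne : ¬ PySem.Set.equal (c :: rest) ([] : List (Int × Int)) = true := by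
        intro h
        have := (pvSet_equal_empty _).mp h
        simp at this
      have hgeo := pvInv_geo dx dy boxes bp btm (c :: rest) hG hI
      have hdrop := pvMu_drop boxes btm (c :: rest) hnbN hnbBox hnbD
      have hlen : (c :: rest).length ≤ pvMu boxes btm := by omega
      have hfB : (fB - (c :: rest).length) + (c :: rest).length = fB := by omega
      have hsim := pvInnerSim dx dy boxes walls bp btm (c :: rest) hnbN hnbD hgeo
        (c :: rest) [] [] (fB - (c :: rest).length) (by simp) (by simp) (by simp)
      rw [List.append_nil, List.filter_nil, List.append_nil, hfB] at hsim
      cases hgo : pvNextGo dx dy boxes walls bp (c :: rest) [] with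
      | none =>
        rw [hgo] at hsim
        simp only [pvALoop, pvGetNext, PySem.Set.empty, hgo, Option.map_none]
        rw [if_neg hne, hsim]
      | some accF =>
        rw [hgo] at hsim
        simp only [pvALoop, pvGetNext, PySem.Set.empty, hgo, Option.map_some]
        rw [if_neg hne, hsim, pvUnion_append btm (c :: rest) hnbN hnbD, pvDiff_filter]
        refine ihf (fB - (c :: rest).length) (btm ++ c :: rest) _
          (pvInv_step dx dy boxes walls bp btm (c :: rest) accF hG hI hgo) ?_ ?_
        · simp only [List.length_cons] at hdrop ⊢
          omega
        · simp only [List.length_cons] at hdrop hfB ⊢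
          omega

-- ===== VERDICT (by name: the statement is the Claim_ definition above) =====
theorem pvMu_nil_le (boxes : List (Int × Int)) : pvMu boxes [] ≤ boxes.length :=
  (List.length_filter_le _ _).trans (PySem.Set.length_ofList_le _)

theorem get_boxes_to_move_spec : Claim_equal_get_boxes_to_move := by
  intro robot dx dy boxes bp walls _ hPre
  unfold Spec_get_boxes_to_move get_boxes_to_move get_boxes_to_move_alt
  by_cases hw : ((robot.1 + dx, robot.2 + dy) : Int × Int) ∈ walls
  · simp [hw]
  · by_cases hb : ((robot.1 + dx, robot.2 + dy) : Int × Int) ∈ boxes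
    · have hG := pvPre_good robot dx dy boxes bp walls hPre hw hb
      have hpbox := (hG.2 _ hb).1
      have hpshape := (hG.2 _ hb).2.1
      have hpne : pvPair bp (robot.1 + dx, robot.2 + dy) ≠ (robot.1 + dx, robot.2 + dy) := by
        rcases hpshape with h | h <;> rw [h] <;> intro he <;>
          · have h1 := congrArg Prod.fst he
            simp only [] at h1
            omega
      have hinit : PySem.Set.add (PySem.Set.add PySem.Set.empty (robot.1 + dx, robot.2 + dy))
          (pvPair bp (robot.1 + dx, robot.2 + dy)) =
          [((robot.1 + dx, robot.2 + dy) : Int × Int), pvPair bp (robot.1 + dx, robot.2 + dy)] := by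
        have h1 : PySem.Set.add PySem.Set.empty ((robot.1 + dx, robot.2 + dy) : Int × Int) =
            [(robot.1 + dx, robot.2 + dy)] := rfl
        rw [h1, PySem.Set.add_of_not_mem (by
          intro hmem
          exact hpne (List.mem_singleton.mp hmem))]
        rfl
      have hInv : pvInv dx dy boxes []
          [((robot.1 + dx, robot.2 + dy) : Int × Int), pvPair bp (robot.1 + dx, robot.2 + dy)] := by
        obtain ⟨P, hP⟩ : ∃ P, pvPair bp (robot.1 + dx, robot.2 + dy) = P := ⟨_, rfl⟩
        rw [hP] at hpshape hpne hpbox ⊢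
        obtain ⟨P1, P2⟩ := P
        simp only [Prod.mk.injEq] at hpshape
        refine ⟨?_, ?_, by simp, ?_⟩
        · refine List.nodup_cons.mpr ⟨?_, by simp⟩
          intro h
          exact hpne (List.mem_singleton.mp h).symm
        · intro x hx
          rcases List.mem_cons.mp hx with rfl | hx2
          · exact hb
          · rw [List.mem_singleton.mp hx2]
            exact hpbox
        · rcases hG.1 with ⟨hdx, hdy⟩ | ⟨hdx, hdy⟩ | ⟨hdx, hdy⟩ | ⟨hdx, hdy⟩
          · subst hdx; subst hdy
            right
            refine ⟨rfl, ?_⟩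
            rcases hpshape with ⟨h1, h2⟩ | ⟨h1, h2⟩
            · refine ⟨(robot.1 + 1, robot.2 + 0), by simp, ?_⟩
              intro x hx
              rcases List.mem_cons.mp hx with rfl | hx2
              · left; rfl
              · rw [List.mem_singleton.mp hx2]
                right; simp only [Prod.mk.injEq]; omega
            · refine ⟨(P1, P2), by simp, ?_⟩
              intro x hx
              rcases List.mem_cons.mp hx with rfl | hx2
              · right; simp only [Prod.mk.injEq]; omega
              · rw [List.mem_singleton.mp hx2]; left; rfl
          · subst hdx; subst hdy
            right
            refine ⟨rfl, ?_⟩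
            rcases hpshape with ⟨h1, h2⟩ | ⟨h1, h2⟩
            · refine ⟨(P1, P2), by simp, ?_⟩
              intro x hx
              rcases List.mem_cons.mp hx with rfl | hx2
              · right; simp only [Prod.mk.injEq]; omega
              · rw [List.mem_singleton.mp hx2]; left; rfl
            · refine ⟨(robot.1 + -1, robot.2 + 0), by simp, ?_⟩
              intro x hx
              rcases List.mem_cons.mp hx with rfl | hx2
              · left; rfl
              · rw [List.mem_singleton.mp hx2]
                right; simp only [Prod.mk.injEq]; omega
          · subst hdx; subst hdy
            left
            refine ⟨rfl, pvPhi 0 1 (robot.1 + 0, robot.2 + 1), by simp, ?_⟩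
            intro x hx
            rcases List.mem_cons.mp hx with rfl | hx2
            · rfl
            · rw [List.mem_singleton.mp hx2]
              rcases hpshape with ⟨h1, h2⟩ | ⟨h1, h2⟩ <;>
                · simp only [pvPhi]
                  omega
          · subst hdx; subst hdy
            left
            refine ⟨rfl, pvPhi 0 (-1) (robot.1 + 0, robot.2 + -1), by simp, ?_⟩
            intro x hx
            rcases List.mem_cons.mp hx with rfl | hx2
            · rfl
            · rw [List.mem_singleton.mp hx2]
              rcases hpshape with ⟨h1, h2⟩ | ⟨h1, h2⟩ <;>
                · simp only [pvPhi]
                  omega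
      have hμA : pvMu boxes [] < boxes.length + 2 := by
        have := pvMu_nil_le boxes
        omega
      have hμB : pvMu boxes [] < boxes.length + bp.length + 2 := by
        have := pvMu_nil_le boxes
        omega
      have houter := pvOuterSim dx dy boxes walls bp hG (boxes.length + 2)
        (boxes.length + bp.length + 2) []
        [((robot.1 + dx, robot.2 + dy) : Int × Int), pvPair bp (robot.1 + dx, robot.2 + dy)]
        hInv hμA hμB
      simp only [if_neg hw, hinit]
      rw [if_neg (by simp [hb]), if_neg (by simp [hb]), if_pos hpne]
      exact houter
    · simp [hw, hb]
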